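-- pv_equiv track=rewrite | github.com/egmnklc/My-Sabanci-Adventure | CS 301/ab.py | longest_simple_cycle
-- ===== SOURCE A (Python) =====
-- import itertools
--
-- def is_simple_cycle(graph, permutation):
--     n = len(permutation)
--     # Check if first and last nodes are connected
--     if graph[permutation[0]][permutation[-1]] == 0:
--         return False
--     # Check if consecutive nodes are connected
--     for i in range(1, n):
--         if graph[permutation[i]][permutation[i-1]] == 0:
--             return False
--     return True
--
-- def longest_simple_cycle(graph):
--     n = len(graph)
--     longest_cycle = 0
--     for k in range(3, n + 1):  # Simple cycles have at least 3 nodes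
--         for permutation in itertools.permutations(range(n), k):
--             if is_simple_cycle(graph, permutation):
--                 longest_cycle = max(longest_cycle, k)
--     return longest_cycle
-- ===== SOURCE B (Python) =====
-- def longest_simple_cycle(graph):
--     # DFS over simple paths with pruning: a path is only extended along existing
--     # edges, cycles are recorded when an edge back to the start exists, and the
--     # search stops once a cycle through all n vertices is found (none is longer).
--     n = len(graph)
--     if n < 3:
--         return 0  # a simple cycle needs at least 3 vertices
--     best = 0
--
--     def extend(start, last, visited, length):
--         nonlocal best
--         if best >= n:
--             return
--         for w in range(n):
--             if w not in visited and graph[w][last] != 0: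
--                 if length + 1 >= 3 and graph[start][w] != 0:
--                     best = max(best, length + 1)
--                 extend(start, w, visited | {w}, length + 1)
--
--     for s in range(n):
--         extend(s, s, {s}, 1)
--     return best
-- ===== Notes on version B (the rewrite author's own statement) =====
-- stated objective: faster
-- what changed: A enumerates, for every k from 3 to n, all k-permutations of the vertices and tests each tuple for being a cycle; B runs one recursive DFS over simple paths, extending a path only along existing edges (pruning away all non-path tuples) and stopping as soon as a cycle through all n vertices is found.
import Mathlib
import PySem

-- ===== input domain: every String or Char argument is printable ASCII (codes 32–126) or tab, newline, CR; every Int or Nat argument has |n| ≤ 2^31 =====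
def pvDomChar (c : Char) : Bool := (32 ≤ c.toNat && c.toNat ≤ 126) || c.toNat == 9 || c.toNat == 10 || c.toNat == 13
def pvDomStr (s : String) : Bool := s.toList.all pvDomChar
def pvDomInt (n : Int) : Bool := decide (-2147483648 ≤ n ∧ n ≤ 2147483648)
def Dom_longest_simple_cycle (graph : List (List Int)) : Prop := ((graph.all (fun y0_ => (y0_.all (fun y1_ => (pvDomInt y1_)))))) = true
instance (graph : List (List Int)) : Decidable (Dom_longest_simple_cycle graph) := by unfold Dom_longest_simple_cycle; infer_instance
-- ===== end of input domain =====

-- B replaces A's per-length enumeration of all k-permutations by one DFS over simple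
-- paths that extends only along existing edges (pruning); measurably faster.

-- ===== PORT A =====
-- graph[i][j]; the .getD defaults are never reached under Pre_ (every index used is an
-- off-diagonal pair of vertices, in range under Pre_), where Python indexing is exact.
def pvCell (g : List (List Int)) (i j : Int) : Int :=
  (PySem.List.pyGet? ((PySem.List.pyGet? g i).getD []) j).getD 0

def is_simple_cycle (g : List (List Int)) (p : List Int) : Bool :=
  -- n = len(permutation); p[0], p[-1], p[i] are in range for the tuples A feeds in
  if pvCell g ((PySem.List.pyGet? p 0).getD 0) ((PySem.List.pyGet? p (-1)).getD 0) == 0 then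
    false
  else
    -- 'for i in range(1, n): if graph[p[i]][p[i-1]] == 0: return False / return True'
    (PySem.List.pyRange 1 (p.length : Int) 1).all (fun i =>
      !(pvCell g ((PySem.List.pyGet? p i).getD 0) ((PySem.List.pyGet? p (i - 1)).getD 0) == 0))

def longest_simple_cycle (graph : List (List Int)) : Int :=
  let n : Nat := graph.length
  (PySem.List.pyRange 3 ((n : Int) + 1) 1).foldl (fun lc k =>
    (PySem.List.permutations (PySem.List.pyRange 0 (n : Int) 1) k.toNat).foldl
      (fun lc p => if is_simple_cycle graph p then max lc k else lc) lc) 0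

-- ===== PORT B =====
-- the nested 'extend' of Source B; 'best' is threaded, 'visited' is the path in reverse;
-- fuel bounds the recursion depth (each call adds one unvisited vertex, so n is enough)
def lscDfs (g : List (List Int)) (start : Int) :
    List Int → Int → Int → Int → Nat → Int
  | _, _, _, best, 0 => best
  | visited, last, len, best, fuel + 1 =>
    -- 'if best >= n: return' — no cycle is longer than the n vertices
    if (g.length : Int) ≤ best then best else
    (PySem.List.pyRange 0 (g.length : Int) 1).foldl (fun best w =>
      if !visited.contains w && !(pvCell g w last == 0) then
        let best := if decide (3 ≤ len + 1) && !(pvCell g start w == 0) then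
            max best (len + 1) else best
        lscDfs g start (w :: visited) w (len + 1) best fuel
      else best) best

def longest_simple_cycle_alt (graph : List (List Int)) : Int :=
  let n : Nat := graph.length
  -- 'if n < 3: return 0' — a simple cycle needs at least 3 vertices
  if n < 3 then 0 else
  (PySem.List.pyRange 0 (n : Int) 1).foldl (fun best s =>
    lscDfs graph s [s] s 1 best n) 0

-- ===== PRECONDITION & SPEC =====
-- Pre_ excludes exactly the inputs on which Python A raises IndexError: graphs with
-- n ≥ 3 vertices where some row i is too short for the off-diagonal accesses A makes
-- (shorter than n, or shorter than n-1 for the last row, whose diagonal slot at index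
-- n-1 is never read). On every other input A returns normally and B matches it.
def Pre_longest_simple_cycle (graph : List (List Int)) : Prop :=
  3 ≤ graph.length →
    ∀ p ∈ graph.zipIdx,
      (if p.2 + 1 = graph.length then graph.length - 1 else graph.length) ≤ p.1.length
instance (graph : List (List Int)) : Decidable (Pre_longest_simple_cycle graph) := by
  unfold Pre_longest_simple_cycle; infer_instance

def pvWitness_longest_simple_cycle : List (List Int) :=
  [[0, 1, 1], [1, 0, 1], [1, 1, 0]]

def Spec_longest_simple_cycle (graph : List (List Int)) (out : Int) : Prop := out = longest_simple_cycle_alt graph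
instance (graph : List (List Int)) (out : Int) : Decidable (Spec_longest_simple_cycle graph out) := by unfold Spec_longest_simple_cycle; infer_instance

-- ===== CLAIM (what is proved, stated in full; the proofs are below) =====
def Claim_equal_longest_simple_cycle : Prop := ∀ (graph : List (List Int)), Dom_longest_simple_cycle graph → Pre_longest_simple_cycle graph → Spec_longest_simple_cycle graph (longest_simple_cycle graph)

-- ===== LEMMAS AND PROOFS =====

-- the vertex list range(n)
def pvR (g : List (List Int)) : List Int := PySem.List.pyRange 0 (g.length : Int) 1

-- graph[u][v] != 0
def pvEdge (g : List (List Int)) (u v : Int) : Bool := !(pvCell g u v == 0)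

-- the consecutive-edge condition along prev :: l
def pvChain (g : List (List Int)) : Int → List Int → Bool
  | _, [] => true
  | prev, w :: q => pvEdge g w prev && pvChain g w q

-- p is a cycle in A's sense (ignoring the length-≥-3 requirement)
def pvCyc (g : List (List Int)) (p : List Int) : Bool :=
  match p with
  | [] => false
  | s :: q => pvEdge g s ((s :: q).getLastD 0) && pvChain g s q

-- ---- generic fold bounds ----
lemma pvFoldl_le_of_step {α : Type} (l : List α) (f : Int → α → Int) (b : Int)
    (hmono : ∀ b x, x ∈ l → b ≤ f b x) : b ≤ l.foldl f b := by
  induction l generalizing b with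
  | nil => simp
  | cons x t ih =>
    simp only [List.foldl_cons]
    exact le_trans (hmono b x (by simp)) (ih (f b x) (fun b y hy => hmono b y (by simp [hy])))

lemma pvFoldl_ge_elem {α : Type} (l : List α) (f : Int → α → Int) (b t : Int) (w : α)
    (hmono : ∀ b x, x ∈ l → b ≤ f b x) (hw : w ∈ l) (ht : ∀ b, t ≤ f b w) :
    t ≤ l.foldl f b := by
  induction l generalizing b with
  | nil => simp at hw
  | cons x xs ih =>
    simp only [List.foldl_cons]
    rcases List.mem_cons.mp hw with h | h
    · subst h
      exact le_trans (ht b) (pvFoldl_le_of_step xs f (f b w) (fun b y hy => hmono b y (List.mem_cons_of_mem _ hy)))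
    · exact ih (f b x) (fun b y hy => hmono b y (List.mem_cons_of_mem _ hy)) h

lemma pvFoldl_ub {α : Type} (l : List α) (f : Int → α → Int) (b c : Int)
    (hstep : ∀ b x, x ∈ l → b ≤ c → f b x ≤ c) (hb : b ≤ c) : l.foldl f b ≤ c := by
  induction l generalizing b with
  | nil => simpa
  | cons x t ih =>
    simp only [List.foldl_cons]
    exact ih (f b x) (fun b y hy => hstep b y (List.mem_cons_of_mem _ hy)) (hstep b x (by simp) hb)

-- ---- permutations membership (completeness half) ----
lemma pvMem_permutations (p l : List Int) (hl : l.Nodup) (hp : p.Nodup)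
    (hsub : ∀ x ∈ p, x ∈ l) : p ∈ PySem.List.permutations l p.length := by
  induction p generalizing l with
  | nil => simp [PySem.List.permutations_zero]
  | cons x q ih =>
    obtain ⟨i, hi⟩ := List.mem_iff_getElem?.mp (hsub x (by simp))
    have hperm := PySem.List.perm_cons_eraseIdx l hi
    have hlen : i < l.length := by
      by_contra h
      rw [List.getElem?_eq_none (by omega)] at hi
      exact (by simp at hi : False).elim
    rw [List.length_cons, PySem.List.permutations_succ]
    refine List.mem_flatMap.mpr ⟨i, List.mem_range.mpr hlen, ?_⟩
    rw [hi]
    refine List.mem_map.mpr ⟨q, ?_, rfl⟩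
    have hnd' : (x :: l.eraseIdx i).Nodup := hperm.nodup_iff.mpr hl
    apply ih (l.eraseIdx i) (List.Nodup.of_cons hnd') (List.Nodup.of_cons hp)
    intro y hy
    have hyl : y ∈ l := hsub y (by simp [hy])
    have : y = x ∨ y ∈ l.eraseIdx i := List.mem_cons.mp (hperm.mem_iff.mpr hyl)
    rcases this with h | h
    · exact absurd (h ▸ hy) (by simpa using (List.nodup_cons.mp hp).1)
    · exact h

-- ---- bridging A's indexed check to pvChain ----
lemma pvChain_of_range (g : List (List Int)) (q : List Int) (s : Int) :
    (List.range q.length).all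
      ((fun i : Int =>
        !(pvCell g ((PySem.List.pyGet? (s :: q) i).getD 0)
          ((PySem.List.pyGet? (s :: q) (i - 1)).getD 0) == 0)) ∘ (fun k : Nat => 1 + (k : Int)))
    = pvChain g s q := by
  induction q generalizing s with
  | nil => simp [pvChain]
  | cons w q' ih =>
    rw [List.length_cons, List.range_succ_eq_map, List.all_cons, List.all_map]
    have h1 : (PySem.List.pyGet? (s :: w :: q') ((1 : Int) + ((0 : Nat) : Int))) = some w := by
      rw [show (1 : Int) + ((0 : Nat) : Int) = ((0 : Nat) : Int) + 1 by omega,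
        PySem.List.pyGet?_cons_succ]
      rw [show ((0 : Nat) : Int) = 0 by omega]
      exact PySem.List.pyGet?_zero_cons _ _
    have h1' : (PySem.List.pyGet? (s :: w :: q') ((1 : Int) + ((0 : Nat) : Int) - 1)) = some s := by
      rw [show (1 : Int) + ((0 : Nat) : Int) - 1 = 0 by omega]
      exact PySem.List.pyGet?_zero_cons _ _
    have hshift :
        (((fun i : Int =>
          !(pvCell g ((PySem.List.pyGet? (s :: w :: q') i).getD 0)
            ((PySem.List.pyGet? (s :: w :: q') (i - 1)).getD 0) == 0)) ∘ (fun k : Nat => 1 + (k : Int))) ∘ Nat.succ)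
        = ((fun i : Int =>
          !(pvCell g ((PySem.List.pyGet? (w :: q') i).getD 0)
            ((PySem.List.pyGet? (w :: q') (i - 1)).getD 0) == 0)) ∘ (fun k : Nat => 1 + (k : Int))) := by
      funext k
      simp only [Function.comp_apply, Nat.succ_eq_add_one]
      rw [show (1 : Int) + ((k + 1 : Nat) : Int) = (((k + 1) : Nat) : Int) + 1 by omega,
        PySem.List.pyGet?_cons_succ]
      rw [show (((k + 1) : Nat) : Int) + 1 - 1 = ((k : Nat) : Int) + 1 by omega,
        PySem.List.pyGet?_cons_succ]
      rw [show (((k + 1) : Nat) : Int) = ((k : Nat) : Int) + 1 by omega,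
        PySem.List.pyGet?_cons_succ]
      rw [show (1 : Int) + ((k : Nat) : Int) = ((k : Nat) : Int) + 1 by omega]
      rw [show ((k : Nat) : Int) + 1 - 1 = ((k : Nat) : Int) by omega]
      rw [PySem.List.pyGet?_cons_succ]
    rw [hshift, ih w]
    simp only [Function.comp_apply, h1, h1']
    simp [pvChain, pvEdge]

lemma pvIsSimpleCycle_eq (g : List (List Int)) (p : List Int) (hne : p ≠ []) :
    is_simple_cycle g p = pvCyc g p := by
  obtain ⟨s, q, rfl⟩ := List.exists_cons_of_ne_nil hne
  unfold is_simple_cycle pvCyc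
  rw [PySem.List.pyGet?_zero_cons, PySem.List.pyGet?_neg_one]
  have hlast : ((s :: q).getLast?).getD 0 = (s :: q).getLastD 0 :=
    (List.getLastD_eq_getLast? ..).symm
  have hn : (((s :: q).length : Int) - 1).toNat = q.length := by
    simp
  rw [PySem.List.pyRange_one, hn, List.all_map]
  simp only [Option.getD_some, hlast]
  rw [pvChain_of_range g q s]
  have hbe : ∀ x : Int, (x == 0) = decide (x = 0) := fun x => rfl
  simp [pvEdge, hbe]

-- ---- characterizing A ----
lemma pvA_nonneg (g : List (List Int)) : 0 ≤ longest_simple_cycle g := by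
  unfold longest_simple_cycle
  apply pvFoldl_le_of_step
  intro b k _
  apply pvFoldl_le_of_step
  intro b p _
  split <;> simp

lemma pvLen_le_n (g : List (List Int)) (p : List Int) (hp : p.Nodup)
    (hsub : ∀ x ∈ p, x ∈ pvR g) : p.length ≤ g.length := by
  have h := List.Subperm.length_le (List.subperm_of_subset hp (fun x hx => hsub x hx))
  simpa [pvR, PySem.List.length_pyRange_one] using h

-- A is at least the length of any simple cycle on vertices of g
lemma pvA_ge_cyc (g : List (List Int)) (p : List Int) (h3 : 3 ≤ p.length)
    (hp : p.Nodup) (hsub : ∀ x ∈ p, x ∈ pvR g) (hc : pvCyc g p = true) :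
    (p.length : Int) ≤ longest_simple_cycle g := by
  have hlen : p.length ≤ g.length := pvLen_le_n g p hp hsub
  unfold longest_simple_cycle
  apply pvFoldl_ge_elem _ _ _ _ ((p.length : Int))
  · intro b k _
    apply pvFoldl_le_of_step
    intro b q _
    split
    · exact le_max_left _ _
    · exact le_refl b
  · exact PySem.List.mem_pyRange_one.mpr ⟨by exact_mod_cast h3, by omega⟩
  · intro b
    apply pvFoldl_ge_elem _ _ _ _ p
    · intro b q _
      split
      · exact le_max_left _ _
      · exact le_refl b
    · have : ((p.length : Int)).toNat = p.length := by omega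
      rw [this]
      exact pvMem_permutations p _ (PySem.List.nodup_pyRange_one _ _) hp hsub
    · intro b
      rw [pvIsSimpleCycle_eq g p (by intro h; subst h; simp at h3), hc]
      simp

-- A is bounded by any c that dominates all simple cycles
lemma pvA_le (g : List (List Int)) (c : Int) (hc : 0 ≤ c)
    (h : ∀ p : List Int, 3 ≤ p.length → p.Nodup → (∀ x ∈ p, x ∈ pvR g) →
      pvCyc g p = true → (p.length : Int) ≤ c) :
    longest_simple_cycle g ≤ c := by
  unfold longest_simple_cycle
  apply pvFoldl_ub _ _ _ _ _ hc
  intro b k hk hb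
  apply pvFoldl_ub _ _ _ _ _ hb
  intro b p hpmem hb'
  have hk3 : (3 : Int) ≤ k := (PySem.List.mem_pyRange_one.mp hk).1
  split
  · rename_i hsc
    have hplen : p.length = k.toNat := PySem.List.length_of_mem_permutations hpmem
    have h3' : 3 ≤ p.length := by omega
    obtain ⟨-, rest, hperm⟩ := PySem.List.exists_perm_of_mem_permutations _ _ _ hpmem
    have hnd : p.Nodup :=
      (List.Nodup.of_append_left (hperm.nodup_iff.mpr (PySem.List.nodup_pyRange_one _ _)))
    have hmm : ∀ x ∈ p, x ∈ pvR g := fun x hx =>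
      PySem.List.mem_of_mem_of_mem_permutations hpmem hx
    have hcyc : pvCyc g p = true := by
      rw [← pvIsSimpleCycle_eq g p (by intro h; subst h; simp at h3')]
      exact hsc
    have := h p h3' hnd hmm hcyc
    have hkk : (p.length : Int) = k := by omega
    rw [hkk] at this
    exact max_le hb' this
  · exact hb'

-- ---- characterizing B ----
lemma pvChain_append (g : List (List Int)) (t u : List Int) (s : Int) :
    pvChain g s (t ++ u) = (pvChain g s t && pvChain g ((s :: t).getLastD 0) u) := by
  induction t generalizing s with
  | nil => simp [pvChain]
  | cons w t' ih =>
    simp only [List.cons_append, pvChain, ih w, List.getLastD_cons]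
    cases pvEdge g w s <;> simp

lemma pvDfs_ge_best (g : List (List Int)) (start : Int) (visited : List Int)
    (last len best : Int) (fuel : Nat) :
    best ≤ lscDfs g start visited last len best fuel := by
  induction fuel generalizing visited last len best with
  | zero => simp [lscDfs]
  | succ f ih =>
    rw [lscDfs]
    split
    · exact le_refl best
    apply pvFoldl_le_of_step
    intro b w _
    dsimp only
    split
    · exact le_trans (by split <;> simp) (ih _ _ _ _)
    · exact le_refl b

lemma pvB_nonneg (g : List (List Int)) : 0 ≤ longest_simple_cycle_alt g := by
  unfold longest_simple_cycle_alt
  dsimp only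
  split
  · exact le_refl 0
  apply pvFoldl_le_of_step
  intro b s _
  exact pvDfs_ge_best g s [s] s 1 b g.length

-- DFS completeness: a valid continuation q is explored and its cycle recorded
lemma pvDfs_ge (g : List (List Int)) (start : Int) (q t : List Int) (best : Int) (fuel : Nat)
    (hfuel : q.length ≤ fuel) (hqne : q ≠ [])
    (hsub : ∀ x ∈ start :: (t ++ q), x ∈ pvR g) (hnd : (start :: (t ++ q)).Nodup)
    (hchain : pvChain g start (t ++ q) = true)
    (hclose : pvEdge g start ((start :: (t ++ q)).getLastD 0) = true)
    (h3 : 3 ≤ 1 + t.length + q.length) :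
    ((1 + t.length + q.length : Nat) : Int) ≤
      lscDfs g start ((start :: t).reverse) ((start :: t).getLastD 0) ((t.length : Int) + 1) best fuel := by
  induction q generalizing t best fuel with
  | nil => exact absurd rfl hqne
  | cons w q' ih =>
    cases fuel with
    | zero => simp at hfuel
    | succ f =>
      rw [lscDfs]
      split
      · rename_i hbig
        -- the search was cut because a cycle through all vertices was already found
        have hle : (start :: (t ++ w :: q')).length ≤ g.length := pvLen_le_n g _ hnd hsub
        simp only [List.length_cons, List.length_append] at hle
        refine le_trans ?_ hbig
        simp only [List.length_cons]
        push_cast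
        omega
      apply pvFoldl_ge_elem _ _ _ _ w
      · -- each fold step can only grow the accumulator
        intro b x _
        dsimp only
        split
        · exact le_trans (by split <;> simp) (pvDfs_ge_best _ _ _ _ _ _ _)
        · exact le_refl b
      · exact hsub w (by simp)
      · intro b
        have hnd2 : ((start :: t) ++ w :: q').Nodup := by
          rw [show (start :: t) ++ w :: q' = start :: (t ++ w :: q') by simp]
          exact hnd
        have hwmem : w ∉ start :: t := fun hmem =>
          List.disjoint_of_nodup_append hnd2 hmem (by simp)
        have hchain2 := hchain
        rw [pvChain_append g t (w :: q') start] at hchain2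
        have hedge : pvEdge g w ((start :: t).getLastD 0) = true := by
          rcases Bool.and_eq_true_iff.mp hchain2 with ⟨-, h2⟩
          exact (Bool.and_eq_true_iff.mp ((by simpa [pvChain] using h2 : (pvEdge g w ((start :: t).getLastD 0) && pvChain g w q') = true))).1
        have hcond : (!(start :: t).reverse.contains w && !(pvCell g w ((start :: t).getLastD 0) == 0)) = true := by
          have h1 : (start :: t).reverse.contains w = false := by
            rw [← Bool.not_eq_true]
            intro hcon
            exact hwmem (List.mem_reverse.mp (List.contains_iff_mem.mp hcon))
          rw [h1]
          simpa [pvEdge] using hedge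
        dsimp only
        rw [hcond]
        simp only [if_true]
        -- rewrite the recursive state to the (t ++ [w]) form
        have e1 : w :: (start :: t).reverse = (start :: (t ++ [w])).reverse := by
          rw [show start :: (t ++ [w]) = (start :: t) ++ [w] by simp, List.reverse_concat]
        have e2 : w = (start :: (t ++ [w])).getLastD 0 := by
          rw [show start :: (t ++ [w]) = (start :: t) ++ [w] by simp, List.getLastD_concat]
        have e3 : (t.length : Int) + 1 + 1 = ((t ++ [w]).length : Int) + 1 := by
          simp only [List.length_append, List.length_cons, List.length_nil]
          push_cast
          ring
        cases q' with
        | nil =>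
          -- the cycle closes here: its length is recorded into best before recursing
          simp only [List.length_cons, List.length_nil] at h3
          have hcl := hclose
          rw [← e2] at hcl
          unfold pvEdge at hcl
          have hd : decide (3 ≤ (t.length : Int) + 1 + 1) = true := by
            simp only [decide_eq_true_eq]
            omega
          rw [hd, hcl]
          simp only [Bool.true_and, if_true]
          refine le_trans ?_ (pvDfs_ge_best _ _ _ _ _ _ _)
          refine le_trans ?_ (le_max_right _ _)
          simp only [List.length_cons, List.length_nil]
          push_cast
          omega
        | cons w2 q'' =>
          have hrec := ih (t := t ++ [w])
            (best := if decide (3 ≤ (t.length : Int) + 1 + 1) && !(pvCell g start w == 0) then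
              max b ((t.length : Int) + 1 + 1) else b) (fuel := f)
            (by simp only [List.length_cons] at hfuel ⊢; omega) (by simp)
            (by intro x hx; apply hsub; simpa [List.append_assoc] using hx)
            (by simpa [List.append_assoc] using hnd)
            (by simpa [List.append_assoc] using hchain)
            (by simpa [List.append_assoc] using hclose)
            (by simp only [List.length_append, List.length_cons, List.length_nil] at h3 ⊢; omega)
          rw [← e3, ← e2, ← e1] at hrec
          refine le_trans ?_ hrec
          simp only [List.length_append, List.length_cons, List.length_nil]
          push_cast
          omega

lemma pvB_ge_cyc (g : List (List Int)) (p : List Int) (h3 : 3 ≤ p.length)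
    (hp : p.Nodup) (hsub : ∀ x ∈ p, x ∈ pvR g) (hc : pvCyc g p = true) :
    (p.length : Int) ≤ longest_simple_cycle_alt g := by
  obtain ⟨s, q, rfl⟩ := List.exists_cons_of_ne_nil (show p ≠ [] by intro h; subst h; simp at h3)
  have hlen : (s :: q).length ≤ g.length := pvLen_le_n g _ hp hsub
  unfold longest_simple_cycle_alt
  dsimp only
  rw [if_neg (by simp only [List.length_cons] at hlen h3; omega)]
  apply pvFoldl_ge_elem _ _ _ _ s
  · intro b x _
    exact pvDfs_ge_best _ _ _ _ _ _ _
  · exact hsub s (by simp)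
  · intro b
    rcases Bool.and_eq_true_iff.mp (by simpa [pvCyc] using hc) with ⟨hclose, hchain⟩
    have hd := pvDfs_ge g s q [] b g.length
      (by simp at hlen ⊢; omega) (by intro h; subst h; simp at h3)
      (by simpa using hsub) (by simpa using hp)
      (by simpa using hchain) (by simpa using hclose)
      (by simp at h3 ⊢; omega)
    simp only [List.nil_append, List.length_nil, List.reverse_cons, List.reverse_nil,
      List.getLastD_cons, List.getLastD_nil, Nat.cast_zero, zero_add] at hd
    refine le_trans (le_of_eq ?_) hd
    simp only [List.length_cons]
    push_cast
    ring

-- DFS soundness: starting from a chain state, the result is bounded by any c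
-- dominating best and all simple cycles
lemma pvDfs_le (g : List (List Int)) (start : Int) (t : List Int) (best c : Int) (fuel : Nat)
    (h : ∀ p : List Int, 3 ≤ p.length → p.Nodup → (∀ x ∈ p, x ∈ pvR g) →
      pvCyc g p = true → (p.length : Int) ≤ c)
    (hsub : ∀ x ∈ start :: t, x ∈ pvR g) (hnd : (start :: t).Nodup)
    (hchain : pvChain g start t = true) (hbest : best ≤ c) :
    lscDfs g start ((start :: t).reverse) ((start :: t).getLastD 0) ((t.length : Int) + 1) best fuel ≤ c := by
  induction fuel generalizing t best with
  | zero => simpa [lscDfs] using hbest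
  | succ f ihf =>
    rw [lscDfs]
    split
    · exact hbest
    apply pvFoldl_ub _ _ _ _ _ hbest
    intro b w hw hb
    dsimp only
    split
    · rename_i hcond
      rcases Bool.and_eq_true_iff.mp hcond with ⟨hnc, hedge⟩
      have hwmem : w ∉ start :: t := by
        simp only [Bool.not_eq_true'] at hnc
        intro hmem
        exact absurd (List.contains_iff_mem.mpr (List.mem_reverse.mpr hmem)) (by rw [hnc]; simp)
      have hwR : w ∈ pvR g := hw
      have hnd' : (start :: (t ++ [w])).Nodup := by
        rw [show start :: (t ++ [w]) = (start :: t) ++ [w] by simp]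
        exact List.Nodup.append hnd (by simp) (by simpa [List.disjoint_left] using hwmem)
      have hchain' : pvChain g start (t ++ [w]) = true := by
        rw [pvChain_append g t [w] start, hchain]
        simpa [pvChain, pvEdge] using hedge
      have hbest' : (if decide (3 ≤ (t.length : Int) + 1 + 1) && !(pvCell g start w == 0) then
          max b ((t.length : Int) + 1 + 1) else b) ≤ c := by
        split
        · rename_i hcl
          rcases Bool.and_eq_true_iff.mp hcl with ⟨hd3, hce⟩
          have hcyc : pvCyc g (start :: (t ++ [w])) = true := by
            have hlastw : (start :: (t ++ [w])).getLastD 0 = w := by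
              rw [show start :: (t ++ [w]) = (start :: t) ++ [w] by simp, List.getLastD_concat]
            simp only [pvCyc, hlastw, hchain']
            simpa [pvEdge] using hce
          have hlen := h (start :: (t ++ [w]))
            (by simp only [decide_eq_true_eq] at hd3; simp; omega) hnd'
            (fun x hx => by
              rcases List.mem_cons.mp hx with h1 | h1
              · exact hsub x (by simp [h1])
              · rcases List.mem_append.mp h1 with h2 | h2
                · exact hsub x (by simp [h2])
                · simpa [List.mem_singleton.mp h2] using hwR)
            hcyc
          have : (t.length : Int) + 1 + 1 ≤ c := by
            refine le_trans ?_ hlen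
            simp
          exact max_le hb this
        · exact hb
      have hrec := ihf (t ++ [w])
        (if decide (3 ≤ (t.length : Int) + 1 + 1) && !(pvCell g start w == 0) then
          max b ((t.length : Int) + 1 + 1) else b)
        (fun x hx => by
          rcases List.mem_cons.mp hx with h1 | h1
          · exact hsub x (by simp [h1])
          · rcases List.mem_append.mp h1 with h2 | h2
            · exact hsub x (by simp [h2])
            · simpa [List.mem_singleton.mp h2] using hwR)
        hnd' hchain' hbest'
      have e1 : w :: (start :: t).reverse = (start :: (t ++ [w])).reverse := by
        rw [show start :: (t ++ [w]) = (start :: t) ++ [w] by simp, List.reverse_concat]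
      have e2 : w = (start :: (t ++ [w])).getLastD 0 := by
        rw [show start :: (t ++ [w]) = (start :: t) ++ [w] by simp, List.getLastD_concat]
      have e3 : (t.length : Int) + 1 + 1 = ((t ++ [w]).length : Int) + 1 := by
        simp only [List.length_append, List.length_cons, List.length_nil]
        push_cast
        ring
      rw [← e3, ← e2, ← e1] at hrec
      exact hrec
    · exact hb

lemma pvB_le (g : List (List Int)) (c : Int) (hc : 0 ≤ c)
    (h : ∀ p : List Int, 3 ≤ p.length → p.Nodup → (∀ x ∈ p, x ∈ pvR g) →
      pvCyc g p = true → (p.length : Int) ≤ c) :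
    longest_simple_cycle_alt g ≤ c := by
  unfold longest_simple_cycle_alt
  dsimp only
  split
  · exact hc
  apply pvFoldl_ub _ _ _ _ _ hc
  intro b s hs hb
  have hd := pvDfs_le g s [] b c g.length h
    (by intro x hx; rw [List.mem_singleton.mp hx]; exact hs)
    (by simp) (by simp [pvChain]) hb
  simpa using hd

-- ===== VERDICT (by name: the statement is the Claim_ definition above) =====
theorem longest_simple_cycle_spec : Claim_equal_longest_simple_cycle := by
  intro g _ _
  unfold Spec_longest_simple_cycle
  apply le_antisymm
  · exact pvA_le g _ (pvB_nonneg g) (fun p h3 hp hsub hc => pvB_ge_cyc g p h3 hp hsub hc)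
  · exact pvB_le g _ (pvA_nonneg g) (fun p h3 hp hsub hc => pvA_ge_cyc g p h3 hp hsub hc)
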